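-- pv_equiv track=rewrite | github.com/torxx666/bloom | bloom2.py | and_value
-- ===== SOURCE A (Python) =====
-- def and_value(value,shift):
--     value =  int(value, 16)
--     max_size = value.bit_length()
--     base= 0
--     for i in range(max_size):
--         t = value & 0xffff
--         base= base  | t
--         value = value >> max_size
--     resp = base << shift
--     return resp
-- ===== SOURCE B (Python) =====
-- def and_value(value, shift):
--     return (int(value, 16) & 0xffff) << shift
-- ===== Notes on version B (the rewrite author's own statement) =====
-- stated objective: simpler
-- what changed: Replaces A's bit_length-iteration OR-and-shift loop with the single closed-form expression (int(value,16) & 0xffff) << shift.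
-- intended difference: On hex strings that parse to a negative integer whose low 16 bits are not all ones, A's loop sign-extends (value >> bit_length is -1, not 0) and ORs 0xffff into the accumulator, returning 0xffff << shift, while B returns (int(value,16) & 0xffff) << shift, the intended low-16-bit mask the loop was written to compute. — e.g. on and_value("-5", 1): A returns 131070, B returns 131062
import Mathlib
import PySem

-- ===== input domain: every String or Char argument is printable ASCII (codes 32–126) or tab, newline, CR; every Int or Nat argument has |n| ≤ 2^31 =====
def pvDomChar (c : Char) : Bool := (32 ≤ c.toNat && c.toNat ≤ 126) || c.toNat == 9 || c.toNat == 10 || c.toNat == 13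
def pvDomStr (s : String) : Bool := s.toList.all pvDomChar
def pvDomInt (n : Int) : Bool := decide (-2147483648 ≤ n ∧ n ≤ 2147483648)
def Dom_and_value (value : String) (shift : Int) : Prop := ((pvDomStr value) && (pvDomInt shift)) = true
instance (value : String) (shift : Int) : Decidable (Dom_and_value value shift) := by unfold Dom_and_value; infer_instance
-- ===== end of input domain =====

-- B replaces A's bit_length-driven OR-and-shift loop by the closed form (int(value,16) & 0xffff) << shift (objective: simpler).

-- ===== PORT A =====
-- the 'for i in range(max_size)' loop, fuel = remaining iterations; state (base, value)
def pvAndLoop (maxSize : Nat) : Nat → Int → Int → Int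
  | 0, base, _ => base
  | fuel + 1, base, v =>
      let t := PySem.Int.band v 0xffff
      pvAndLoop maxSize fuel (PySem.Int.bor base t) (v >>> maxSize)

def and_value (value : String) (shift : Int) : Int :=
  match PySem.Int.ofStrBase? value 16 with    -- int(value, 16); none = ValueError, excluded by Pre_
  | none => 0
  | some v =>
    let maxSize := PySem.Int.bitLength v
    let base := pvAndLoop maxSize maxSize 0 v
    base <<< shift.toNat                       -- base << shift; shift < 0 raises, excluded by Pre_

-- ===== PORT B =====
def and_value_alt (value : String) (shift : Int) : Int :=
  match PySem.Int.ofStrBase? value 16 with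
  | none => 0
  | some v => (PySem.Int.band v 0xffff) <<< shift.toNat

-- ===== PRECONDITION & SPEC =====
-- Pre_ excludes exactly the inputs where A raises: malformed hex (int(value,16) ValueError) and negative shift (<< ValueError).
def Pre_and_value (value : String) (shift : Int) : Prop :=
  (PySem.Int.ofStrBase? value 16).isSome = true ∧ 0 ≤ shift
instance (value : String) (shift : Int) : Decidable (Pre_and_value value shift) := by
  unfold Pre_and_value; infer_instance

def pvWitness_and_value : String × Int := ("1f", 3)

-- On hex strings that parse to a negative integer whose low 16 bits are not all ones, A's loop sign-extends
-- (value >> bit_length is -1, not 0) and ORs 0xffff into the accumulator, returning 0xffff << shift, while B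
-- returns (int(value,16) & 0xffff) << shift, the intended low-16-bit mask the loop was written to compute.
def D_and_value (value : String) (shift : Int) : Prop :=
  (PySem.Int.ofStrBase? value 16).getD 0 < 0 ∧
  PySem.Int.mod ((PySem.Int.ofStrBase? value 16).getD 0) 65536 ≠ 65535
instance (value : String) (shift : Int) : Decidable (D_and_value value shift) := by
  unfold D_and_value; infer_instance

def Spec_and_value (value : String) (shift : Int) (out : Int) : Prop :=
  ¬ D_and_value value shift → out = and_value_alt value shift
instance (value : String) (shift : Int) (out : Int) : Decidable (Spec_and_value value shift out) := by
  unfold Spec_and_value; infer_instance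

def pvDiffWitness_and_value : String × Int := ("-5", 1)
def pvDiffWitnessOut_and_value : Int × Int := (131070, 131062)

-- ===== CLAIM (what is proved, stated in full; the proofs are below) =====
def Claim_unchanged_and_value : Prop := ∀ (value : String) (shift : Int), Dom_and_value value shift → Pre_and_value value shift → Spec_and_value value shift (and_value value shift)
def Claim_changed_and_value : Prop := Dom_and_value (pvDiffWitness_and_value.1) (pvDiffWitness_and_value.2) ∧ Pre_and_value (pvDiffWitness_and_value.1) (pvDiffWitness_and_value.2) ∧ D_and_value (pvDiffWitness_and_value.1) (pvDiffWitness_and_value.2) ∧ and_value (pvDiffWitness_and_value.1) (pvDiffWitness_and_value.2) = pvDiffWitnessOut_and_value.1 ∧ and_value_alt (pvDiffWitness_and_value.1) (pvDiffWitness_and_value.2) = pvDiffWitnessOut_and_value.2 ∧ pvDiffWitnessOut_and_value.1 ≠ pvDiffWitnessOut_and_value.2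
def Claim_exact_and_value : Prop := ∀ (value : String) (shift : Int), Dom_and_value value shift → Pre_and_value value shift → D_and_value value shift → and_value value shift ≠ and_value_alt value shift

-- ===== LEMMAS AND PROOFS =====

-- Python & with the mask 0xffff is mod 2^16 (on every Int, Python-exact sign handling)
theorem pv_band_ffff (v : Int) : PySem.Int.band v 65535 = PySem.Int.mod v 65536 := by
  rw [show PySem.Int.mod v 65536 = v % 65536 from PySem.Int.mod_eq_emod_of_pos (by norm_num)]
  unfold PySem.Int.band
  have hmask : ∀ m : Nat, m &&& 65535 = m % 65536 := by
    intro m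
    have := Nat.and_two_pow_sub_one_eq_mod m 16
    norm_num at this
    exact this
  by_cases h : 0 ≤ v
  · simp only [h, if_true]
    rw [if_pos (by norm_num : (0:Int) ≤ 65535), show Int.toNat 65535 = 65535 from rfl, hmask]
    omega
  · simp only [h, if_false]
    rw [if_pos (by norm_num : (0:Int) ≤ 65535), show Int.toNat 65535 = 65535 from rfl,
       Nat.and_comm, hmask]
    omega

-- once value is 0, the loop body is the identity on base
theorem pvAndLoop_zero (ms : Nat) : ∀ (f : Nat) (b : Int), pvAndLoop ms f b 0 = b := by
  intro f
  induction f with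
  | zero => intro b; rfl
  | succ f ih =>
    intro b
    show pvAndLoop ms f (PySem.Int.bor b (PySem.Int.band 0 0xffff)) ((0:Int) >>> ms) = b
    have h1 : PySem.Int.band 0 0xffff = 0 := by decide
    have h2 : (0:Int) >>> ms = 0 := by
      show Int.ofNat (0 >>> ms) = 0
      simp [Nat.zero_shiftRight]
    rw [h1, PySem.Int.bor_zero, h2, ih]

theorem pv_neg_one_shiftRight (ms : Nat) : (-1 : Int) >>> ms = -1 := by
  show Int.negSucc 0 >>> ms = Int.negSucc 0
  rw [Int.negSucc_shiftRight]
  simp [Nat.zero_shiftRight]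

-- once value is -1 and base is 0xffff, the loop body is the identity
theorem pvAndLoop_neg_one (ms : Nat) : ∀ (f : Nat), pvAndLoop ms f 65535 (-1) = 65535 := by
  intro f
  induction f with
  | zero => rfl
  | succ f ih =>
    show pvAndLoop ms f (PySem.Int.bor 65535 (PySem.Int.band (-1) 0xffff)) ((-1:Int) >>> ms) = 65535
    have h1 : PySem.Int.bor 65535 (PySem.Int.band (-1) 0xffff) = 65535 := by decide
    rw [h1, pv_neg_one_shiftRight, ih]

theorem pv_shiftRight_bitLength_nonneg (v : Int) (h : 0 ≤ v) :
    v >>> PySem.Int.bitLength v = 0 := by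
  obtain ⟨n, rfl⟩ := Int.eq_ofNat_of_zero_le h
  have hb := PySem.Int.lt_two_pow_bitLength (n : Int)
  show Int.ofNat (n >>> PySem.Int.bitLength (n:Int)) = 0
  rw [Nat.shiftRight_eq_div_pow]
  simp only [Int.natAbs_natCast] at hb
  simp [Nat.div_eq_of_lt hb]

theorem pv_shiftRight_bitLength_neg (v : Int) (h : v < 0) :
    v >>> PySem.Int.bitLength v = -1 := by
  obtain ⟨m, rfl⟩ : ∃ m : Nat, v = Int.negSucc m := by
    cases v with
    | ofNat n => exact absurd h (Int.not_lt.mpr (Int.natCast_nonneg n))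
    | negSucc m => exact ⟨m, rfl⟩
  have hb := PySem.Int.lt_two_pow_bitLength (Int.negSucc m)
  show Int.negSucc (m >>> PySem.Int.bitLength (Int.negSucc m)) = Int.negSucc 0
  rw [Nat.shiftRight_eq_div_pow]
  have : m < 2 ^ PySem.Int.bitLength (Int.negSucc m) := by
    simp [Int.natAbs_negSucc] at hb; omega
  rw [Nat.div_eq_of_lt this]

theorem pv_bitLength_pos (v : Int) (h : v ≠ 0) : 0 < PySem.Int.bitLength v := by
  by_contra hc
  have h0 : PySem.Int.bitLength v = 0 := by omega
  have := PySem.Int.lt_two_pow_bitLength v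
  rw [h0] at this
  simp at this
  omega

theorem pv_or_ffff (x : Int) (h0 : 0 ≤ x) (h1 : x < 65536) :
    PySem.Int.bor x 65535 = 65535 := by
  rw [PySem.Int.bor_of_nonneg h0 (by norm_num)]
  have : x.toNat ||| (65535:Int).toNat = 65535 := by
    apply Nat.eq_of_testBit_eq
    intro i
    rw [Nat.testBit_or]
    have h65535 : ∀ j : Nat, (65535 : Nat).testBit j = decide (j < 16) := by
      intro j
      have := Nat.testBit_two_pow_sub_one 16 j
      norm_num at this
      exact this
    by_cases hi : i < 16
    · simp [h65535, hi]
    · have hx : x.toNat < 2 ^ i := by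
        calc x.toNat < 2 ^ 16 := by omega
          _ ≤ 2 ^ i := Nat.pow_le_pow_right (by norm_num) (by omega)
      simp [h65535, hi, Nat.testBit_lt_two_pow hx]
  rw [this]
  norm_num

-- after the first iteration of A's loop the state is (v & 0xffff, v >> bit_length v); characterise A's base
theorem pvAndLoop_result (v : Int) (hv : v ≠ 0) :
    pvAndLoop (PySem.Int.bitLength v) (PySem.Int.bitLength v) 0 v =
      if 0 ≤ v then PySem.Int.band v 0xffff else 65535 := by
  obtain ⟨k, hk⟩ : ∃ k, PySem.Int.bitLength v = k + 1 := by
    have := pv_bitLength_pos v hv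
    exact ⟨PySem.Int.bitLength v - 1, by omega⟩
  rw [hk]
  show pvAndLoop (k + 1) k
      (PySem.Int.bor 0 (PySem.Int.band v 0xffff)) (v >>> (k + 1)) = _
  rw [show PySem.Int.bor 0 (PySem.Int.band v 0xffff) = PySem.Int.band v 0xffff from by
        rw [PySem.Int.bor_comm, PySem.Int.bor_zero]]
  by_cases h : 0 ≤ v
  · have hsh0 : v >>> (k + 1) = 0 := by
      rw [← hk]; exact pv_shiftRight_bitLength_nonneg v h
    rw [if_pos h, hsh0, pvAndLoop_zero]
  · have hsh1 : v >>> (k + 1) = -1 := by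
      rw [← hk]; exact pv_shiftRight_bitLength_neg v (by omega)
    rw [if_neg h, hsh1]
    -- v ≤ -1; a second iteration exists unless v = -1, and for v = -1 the base already is 0xffff
    by_cases hm1 : v = -1
    · subst hm1
      have : PySem.Int.band (-1) 0xffff = 65535 := by decide
      rw [this, pvAndLoop_neg_one]
    · -- v ≤ -2, so |v| ≥ 2 and bit_length ≥ 2: k ≥ 1
      have hk1 : 1 ≤ k := by
        by_contra hc
        have hk0 : k = 0 := by omega
        have hb := PySem.Int.lt_two_pow_bitLength v
        rw [hk, hk0] at hb
        norm_num at hb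
        omega
      obtain ⟨k', rfl⟩ : ∃ k', k = k' + 1 := ⟨k - 1, by omega⟩
      show pvAndLoop (k' + 1 + 1) k'
          (PySem.Int.bor (PySem.Int.band v 0xffff) (PySem.Int.band (-1) 0xffff))
          ((-1:Int) >>> (k' + 1 + 1)) = _
      have hband : PySem.Int.band (-1) 0xffff = 65535 := by decide
      have hx := pv_band_ffff v
      have hx0 : 0 ≤ PySem.Int.band v 65535 := by
        rw [hx]; exact PySem.Int.mod_nonneg v (by norm_num)
      have hx1 : PySem.Int.band v 65535 < 65536 := by
        rw [hx]; exact PySem.Int.mod_lt v (by norm_num)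
      rw [hband, pv_or_ffff _ hx0 hx1, pv_neg_one_shiftRight, pvAndLoop_neg_one]

-- ===== VERDICT (by name: the statement is the Claim_ definition above) =====
theorem and_value_spec : Claim_unchanged_and_value := by
  intro value shift _ hpre hnd
  obtain ⟨hsome, hsh⟩ := hpre
  unfold and_value and_value_alt
  cases hv : PySem.Int.ofStrBase? value 16 with
  | none => rfl
  | some v =>
    simp only
    by_cases hz : v = 0
    · subst hz; rfl
    · rw [pvAndLoop_result v hz]
      by_cases h : 0 ≤ v
      · rw [if_pos h]
      · rw [if_neg h]
        unfold D_and_value at hnd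
        rw [hv] at hnd
        simp only [Option.getD_some] at hnd
        have hmod : PySem.Int.mod v 65536 = 65535 := by
          by_contra hc
          exact hnd ⟨by omega, hc⟩
        rw [pv_band_ffff v, hmod]

theorem and_value_changed : Claim_changed_and_value := by
  unfold Claim_changed_and_value; decide

theorem and_value_tight : Claim_exact_and_value := by
  intro value shift _ hpre hd
  obtain ⟨hsome, hsh⟩ := hpre
  obtain ⟨hneg, hmod⟩ := hd
  unfold and_value and_value_alt
  cases hv : PySem.Int.ofStrBase? value 16 with
  | none => rw [hv] at hsome; simp at hsome
  | some v =>
    rw [hv] at hneg hmod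
    simp only [Option.getD_some] at hneg hmod
    simp only
    rw [pvAndLoop_result v (by omega), if_neg (by omega)]
    intro hEq
    rw [Int.shiftLeft_eq, Int.shiftLeft_eq] at hEq
    have h2 : (2:Int) ^ shift.toNat ≠ 0 := by positivity
    have : (65535 : Int) = PySem.Int.band v 0xffff := mul_right_cancel₀ h2 hEq
    rw [pv_band_ffff v] at this
    omega
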